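-- pv_equiv track=rewrite | github.com/JasonWaataja/droidwook | droidwook.py | make_letter_maps
-- ===== SOURCE A (Python) =====
-- import copy
-- import string
--
-- def is_letter(letter: str) -> bool:
--     """Returns whether or not letter is a a lowercase English character."""
--     return letter in string.ascii_lowercase
--
-- def make_letter_maps(phrase: str) -> list:
--     """Returns a list with the same length as phrase, each element is None if
--     it's not a letter or a dictionary mapping letters to lists of indices where
--     that letter can be found later in the phrase."""
--     maps = [None] * len(phrase)
--     last = None
--     lastLetter = None
--     lastIndex = 0
--     for i in range(len(phrase)-1, -1, -1):
--         letter = phrase[i]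
--         if is_letter(letter):
--             if last is None:
--                 maps[i] = {}
--             else:
--                 maps[i] = copy.deepcopy(last)
--                 if lastLetter in maps[i]:
--                     maps[i][lastLetter].append(lastIndex)
--                 else:
--                     maps[i][lastLetter] = [lastIndex]
--             last = maps[i]
--             lastLetter = letter
--             lastIndex = i
--         else:
--             maps[i] = None
--     return maps
-- ===== SOURCE B (Python) =====
-- import string
--
-- def is_letter(letter: str) -> bool:
--     """Returns whether or not letter is a a lowercase English character."""
--     return letter in string.ascii_lowercase
--
-- def make_letter_maps(phrase: str) -> list:
--     """Same result, by a direct nested rescan: for each letter position i,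
--     build a fresh dict by scanning j from the end down to i+1."""
--     maps = []
--     for i in range(len(phrase)):
--         if not is_letter(phrase[i]):
--             maps.append(None)
--             continue
--         d = {}
--         for j in reversed(range(i + 1, len(phrase))):
--             ch = phrase[j]
--             if is_letter(ch):
--                 if ch in d:
--                     d[ch].append(j)
--                 else:
--                     d[ch] = [j]
--         maps.append(d)
--     return maps
-- ===== Notes on version B (the rewrite author's own statement) =====
-- stated objective: simpler
-- what changed: B drops A's backward incremental state (deepcopy of the previous letter's map plus one appended index) and instead builds each position's map independently by a direct rescan of the suffix from the end down to i+1.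
import Mathlib
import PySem

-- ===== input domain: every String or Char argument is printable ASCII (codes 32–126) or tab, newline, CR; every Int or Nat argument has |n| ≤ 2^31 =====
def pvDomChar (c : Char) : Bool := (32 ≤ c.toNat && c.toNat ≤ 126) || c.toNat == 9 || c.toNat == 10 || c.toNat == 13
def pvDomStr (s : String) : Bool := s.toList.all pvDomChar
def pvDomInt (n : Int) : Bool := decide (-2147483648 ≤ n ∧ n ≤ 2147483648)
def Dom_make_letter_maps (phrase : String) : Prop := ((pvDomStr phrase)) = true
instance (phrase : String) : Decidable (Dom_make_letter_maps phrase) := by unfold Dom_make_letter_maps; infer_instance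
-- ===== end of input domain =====

-- B replaces A's backward incremental deepcopy-and-extend accumulation by a direct per-position
-- rescan of the suffix (simpler decomposition, no shared incremental state); return values agree exactly.

-- ===== PORT A =====
-- is_letter: Python tests membership of the one-character string phrase[i] in
-- string.ascii_lowercase; ported at character level (exact for single characters,
-- the only way either program calls it).
def pv_is_letter (c : Char) : Bool := ("abcdefghijklmnopqrstuvwxyz".toList).contains c

-- body of A's loop; state = (maps, last, lastLetter, lastIndex). lastLetter/lastIndex start as
-- Python's None/0 — lastLetter is only read after being set, "" stands for the unread None.
def pvAStep (cs : List Char)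
    (st : List (Option (PySem.Dict String (List Int))) × Option (PySem.Dict String (List Int)) × String × Int)
    (i : Int) :
    List (Option (PySem.Dict String (List Int))) × Option (PySem.Dict String (List Int)) × String × Int :=
  let maps := st.1
  let last := st.2.1
  let lastLetter := st.2.2.1
  let lastIndex := st.2.2.2
  let letter := PySem.List.pyGetD cs i ' '
  if pv_is_letter letter then
    let m : PySem.Dict String (List Int) :=
      match last with
      | none => PySem.Dict.empty
      | some d =>
        if PySem.Dict.contains d lastLetter then
          PySem.Dict.modify d lastLetter [] (fun l => l ++ [lastIndex])
        else
          PySem.Dict.insert d lastLetter [lastIndex]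
    (PySem.List.pySetD maps i (some m), some m, String.singleton letter, i)
  else
    (PySem.List.pySetD maps i none, last, lastLetter, lastIndex)

def make_letter_maps (phrase : String) : List (Option (List (String × List Int))) :=
  let cs := phrase.toList
  let n := cs.length
  (((PySem.List.pyRange ((n : Int) - 1) (-1) (-1)).foldl (pvAStep cs)
      (List.replicate n none, none, "", 0)).1).map (Option.map PySem.Dict.items)

-- ===== PORT B =====
-- 'if ch in d: d[ch].append(j) else: d[ch] = [j]'
def pvStep (d : PySem.Dict String (List Int)) (c : Char) (j : Int) : PySem.Dict String (List Int) :=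
  if PySem.Dict.contains d (String.singleton c) then
    PySem.Dict.modify d (String.singleton c) [] (fun l => l ++ [j])
  else
    PySem.Dict.insert d (String.singleton c) [j]

-- body of B's inner loop over j
def pvBInner (cs : List Char) (d : PySem.Dict String (List Int)) (j : Int) : PySem.Dict String (List Int) :=
  let ch := PySem.List.pyGetD cs j ' '
  if pv_is_letter ch then pvStep d ch j else d

def make_letter_maps_alt (phrase : String) : List (Option (List (String × List Int))) :=
  let cs := phrase.toList
  let n := cs.length
  (PySem.List.pyRange 0 (n : Int) 1).map (fun i =>
    if pv_is_letter (PySem.List.pyGetD cs i ' ') then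
      some (PySem.Dict.items
        (((PySem.List.pyRange (i + 1) (n : Int) 1).reverse).foldl (pvBInner cs) PySem.Dict.empty))
    else none)

-- ===== PRECONDITION & SPEC =====
def Spec_make_letter_maps (phrase : String) (out : List (Option (List (String × List Int)))) : Prop := out = make_letter_maps_alt phrase
instance (phrase : String) (out : List (Option (List (String × List Int)))) : Decidable (Spec_make_letter_maps phrase out) := by unfold Spec_make_letter_maps; infer_instance

-- ===== CLAIM (what is proved, stated in full; the proofs are below) =====
def Claim_equal_make_letter_maps : Prop := ∀ (phrase : String), Dom_make_letter_maps phrase → Spec_make_letter_maps phrase (make_letter_maps phrase)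

-- ===== LEMMAS AND PROOFS =====

-- the dictionary of later letter occurrences for position i, by downward recursion
def pvD (cs : List Char) (i : Nat) : PySem.Dict String (List Int) :=
  if h : i + 1 < cs.length then
    (if pv_is_letter (cs.getD (i + 1) ' ') then
      pvStep (pvD cs (i + 1)) (cs.getD (i + 1) ' ') ((i + 1 : Nat) : Int)
    else pvD cs (i + 1))
  else PySem.Dict.empty
termination_by cs.length - i

-- index of the nearest letter at position ≥ i, if any
def pvNL (cs : List Char) (i : Nat) : Option Nat :=
  if h : i < cs.length then
    (if pv_is_letter (cs.getD i ' ') then some i else pvNL cs (i + 1))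
  else none
termination_by cs.length - i

theorem pvNL_none_of_ge (cs : List Char) (i : Nat) (h : cs.length ≤ i) : pvNL cs i = none := by
  rw [pvNL]; simp [Nat.not_lt_of_le h]

-- B's inner fold starting at i+1 computes pvD cs i
theorem pvB_fold_eq (cs : List Char) :
    ∀ k i, cs.length ≤ i + k →
      ((PySem.List.pyRange ((i : Int) + 1) (cs.length : Int) 1).reverse).foldl (pvBInner cs) PySem.Dict.empty
        = pvD cs i := by
  intro k
  induction k with
  | zero =>
    intro i hi
    rw [PySem.List.pyRange_one_eq_nil (by omega)]
    rw [pvD]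
    simp [Nat.not_lt_of_le (by omega : cs.length ≤ i + 1)]
  | succ k ih =>
    intro i hi
    by_cases h : i + 1 < cs.length
    · rw [PySem.List.pyRange_one_cons (by omega)]
      rw [List.reverse_cons, List.foldl_append]
      have : ((i : Int) + 1) + 1 = ((i + 1 : Nat) : Int) + 1 := by push_cast; ring
      rw [this, ih (i + 1) (by omega)]
      conv_rhs => rw [pvD, dif_pos h]
      simp only [List.foldl_cons, List.foldl_nil, pvBInner]
      have hg : PySem.List.pyGetD cs ((i : Int) + 1) ' ' = cs.getD (i + 1) ' ' := by
        have : (i : Int) + 1 = ((i + 1 : Nat) : Int) := by push_cast; ring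
        rw [this, PySem.List.pyGetD_natCast]
      rw [hg]
      norm_cast
    · rw [PySem.List.pyRange_one_eq_nil (by omega)]
      rw [pvD]
      simp [h]

-- characterisation of pvD via the nearest letter strictly after i
theorem pvD_char (cs : List Char) :
    ∀ k i, cs.length ≤ i + k →
      pvD cs i = (match pvNL cs (i + 1) with
        | none => PySem.Dict.empty
        | some m => pvStep (pvD cs m) (cs.getD m ' ') ((m : Nat) : Int)) := by
  intro k
  induction k with
  | zero =>
    intro i hi
    rw [pvNL_none_of_ge cs (i+1) (by omega), pvD]
    simp [Nat.not_lt_of_le (by omega : cs.length ≤ i + 1)]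
  | succ k ih =>
    intro i hi
    by_cases h : i + 1 < cs.length
    · rw [pvD, dif_pos h]
      conv_rhs => rw [pvNL, dif_pos h]
      by_cases hl : pv_is_letter (cs.getD (i+1) ' ')
      · simp only [if_pos hl]
      · simp only [if_neg hl]
        exact ih (i + 1) (by omega)
    · rw [pvNL_none_of_ge cs (i+1) (by omega), pvD]
      simp [h]

-- A's maps array after the loop has processed all indices ≥ i
def pvMapsAt (cs : List Char) (i : Nat) : List (Option (PySem.Dict String (List Int))) :=
  (List.range cs.length).map (fun k =>
    if i ≤ k ∧ pv_is_letter (cs.getD k ' ') = true then some (pvD cs k) else none)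

-- A's full state after the loop has processed all indices ≥ i
def pvState (cs : List Char) (i : Nat) :
    List (Option (PySem.Dict String (List Int))) × Option (PySem.Dict String (List Int)) × String × Int :=
  (pvMapsAt cs i,
   match pvNL cs i with
   | none => (none, "", 0)
   | some m => (some (pvD cs m), String.singleton (cs.getD m ' '), (m : Int)))

theorem pvMapsAt_set (cs : List Char) (i : Nat) :
    (pvMapsAt cs (i + 1)).set i
        (if pv_is_letter (cs.getD i ' ') = true then some (pvD cs i) else none)
      = pvMapsAt cs i := by
  apply List.ext_getElem
  · simp [pvMapsAt]
  · intro k hk1 hk2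
    simp only [pvMapsAt, List.getElem_set, List.getElem_map, List.getElem_range]
    by_cases hik : i = k
    · subst hik; simp
    · simp only [if_neg hik]
      have : (i + 1 ≤ k ∧ pv_is_letter (cs.getD k ' ') = true) ↔ (i ≤ k ∧ pv_is_letter (cs.getD k ' ') = true) := by
        constructor <;> rintro ⟨h1, h2⟩ <;> exact ⟨by omega, h2⟩
      split_ifs with h1 h2 h2 <;> first | rfl | (exact absurd (this.mp h1) h2) | (exact absurd (this.mpr h2) h1)

-- the core step: one iteration of A's loop moves the invariant state from i+1 to i
theorem pvAStep_state (cs : List Char) (i : Nat) (h : i < cs.length) :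
    pvAStep cs (pvState cs (i + 1)) (i : Int) = pvState cs i := by
  have hD := pvD_char cs cs.length i (by omega)
  have hms := pvMapsAt_set cs i
  by_cases hl : pv_is_letter (cs.getD i ' ')
  · have hnli : pvNL cs i = some i := by rw [pvNL, dif_pos h, if_pos hl]
    rw [if_pos hl] at hms
    rcases hnl : pvNL cs (i + 1) with _ | m <;> rw [hnl] at hD
    · have hD' : pvD cs i = PySem.Dict.empty := hD
      simp only [pvAStep, pvState, hnl, hnli, PySem.List.pyGetD_natCast, PySem.List.pySetD_natCast,
        if_pos hl, hms, ← hD']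
    · have hD' : pvD cs i = pvStep (pvD cs m) (cs.getD m ' ') (m : Int) := hD
      rw [pvStep] at hD'
      simp only [pvAStep, pvState, hnl, hnli, PySem.List.pyGetD_natCast, PySem.List.pySetD_natCast,
        if_pos hl, ← hD', hms]
  · have hnli : pvNL cs i = pvNL cs (i + 1) := by rw [pvNL, dif_pos h, if_neg hl]
    rw [if_neg hl] at hms
    simp only [pvAStep, pvState, hnli, PySem.List.pyGetD_natCast, PySem.List.pySetD_natCast,
      if_neg hl, hms]

theorem pvA_loop (cs : List Char) :
    ∀ i, i ≤ cs.length →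
      (PySem.List.pyRange ((i : Int) - 1) (-1) (-1)).foldl (pvAStep cs) (pvState cs i) = pvState cs 0 := by
  intro i
  induction i with
  | zero =>
    intro _
    rw [PySem.List.pyRange_neg_one_eq_nil (by omega)]
    rfl
  | succ i ih =>
    intro hi
    have hc : ((i + 1 : Nat) : Int) - 1 = (i : Int) := by push_cast; ring
    rw [hc, PySem.List.pyRange_neg_one_cons (by omega), List.foldl_cons,
      pvAStep_state cs i (by omega)]
    exact ih (by omega)

theorem pvState_top (cs : List Char) :
    pvState cs cs.length = (List.replicate cs.length none, none, "", 0) := by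
  rw [pvState, pvNL_none_of_ge cs cs.length le_rfl]
  have h1 : pvMapsAt cs cs.length = List.replicate cs.length none := by
    rw [pvMapsAt]
    rw [List.map_congr_left (g := fun _ => none) ?_]
    · simp
    · intro k hk
      rw [if_neg]
      rintro ⟨h1, _⟩
      exact absurd (List.mem_range.mp hk) (by omega)
  rw [h1]

-- ===== VERDICT (by name: the statement is the Claim_ definition above) =====
theorem make_letter_maps_spec : Claim_equal_make_letter_maps := by
  intro phrase _
  unfold Spec_make_letter_maps make_letter_maps make_letter_maps_alt
  dsimp only
  have hloop := pvA_loop phrase.toList phrase.toList.length le_rfl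
  rw [pvState_top] at hloop
  rw [hloop]
  rw [pvState, pvMapsAt, PySem.List.pyRange_zero_nat, List.map_map, List.map_map]
  apply List.map_congr_left
  intro k hk
  have hkn : k < phrase.toList.length := List.mem_range.mp hk
  simp only [Function.comp_apply, PySem.List.pyGetD_natCast]
  rw [pvB_fold_eq phrase.toList phrase.toList.length k (by omega)]
  by_cases hl : pv_is_letter (phrase.toList.getD k ' ')
  · rw [if_pos hl, if_pos ⟨Nat.zero_le k, hl⟩]
    rfl
  · rw [if_neg hl, if_neg (by rintro ⟨_, h2⟩; exact hl h2)]
    rfl
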